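-- pv_equiv track=rewrite | github.com/IsaacKhor/rs-discord-bots | viswax.py | java_lcg_next_int
-- ===== SOURCE A (Python) =====
-- def java_lcg_next_int(seed, n, repeats=1):
--     multiplier = 0x5DEECE66D
--     mask = (1 << 48) - 1
--     addend = 0xB
--     seed = (seed ^ multiplier) & mask
--     for i in range(repeats):
--         seed = (seed * multiplier + addend) & mask
--     seed = (seed >> 17)
--     # is power of 2
--     if (n & (n-1) == 0):
--         return int(seed * n // 2**31)
--     slot = seed % n
--     return slot
-- ===== SOURCE B (Python) =====
-- def java_lcg_next_int(seed, n, repeats=1):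
--     multiplier = 0x5DEECE66D
--     mask = (1 << 48) - 1
--     addend = 0xB
--     seed = (seed ^ multiplier) & mask
--     # Advance the LCG by 'repeats' steps at once: binary exponentiation of the
--     # affine map s -> s*multiplier + addend (mod 2**48), O(log repeats).
--     mul_acc, add_acc = 1, 0
--     mul_cur, add_cur = multiplier, addend
--     r = repeats
--     while r > 0:
--         if r & 1:
--             mul_acc, add_acc = (mul_cur * mul_acc) & mask, (mul_cur * add_acc + add_cur) & mask
--         mul_cur, add_cur = (mul_cur * mul_cur) & mask, (mul_cur * add_cur + add_cur) & mask
--         r >>= 1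
--     seed = (mul_acc * seed + add_acc) & mask
--     seed = seed >> 17
--     # is power of 2
--     if n & (n - 1) == 0:
--         return seed * n // 2**31
--     return seed % n
-- ===== Notes on version B (the rewrite author's own statement) =====
-- stated objective: faster
-- what changed: The per-step LCG loop over range(repeats) is replaced by binary exponentiation of the affine map s -> s*multiplier + addend modulo 2^48 (composing square-and-multiply affine coefficients), so the state is advanced in O(log repeats) multiplications instead of O(repeats).
import Mathlib
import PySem

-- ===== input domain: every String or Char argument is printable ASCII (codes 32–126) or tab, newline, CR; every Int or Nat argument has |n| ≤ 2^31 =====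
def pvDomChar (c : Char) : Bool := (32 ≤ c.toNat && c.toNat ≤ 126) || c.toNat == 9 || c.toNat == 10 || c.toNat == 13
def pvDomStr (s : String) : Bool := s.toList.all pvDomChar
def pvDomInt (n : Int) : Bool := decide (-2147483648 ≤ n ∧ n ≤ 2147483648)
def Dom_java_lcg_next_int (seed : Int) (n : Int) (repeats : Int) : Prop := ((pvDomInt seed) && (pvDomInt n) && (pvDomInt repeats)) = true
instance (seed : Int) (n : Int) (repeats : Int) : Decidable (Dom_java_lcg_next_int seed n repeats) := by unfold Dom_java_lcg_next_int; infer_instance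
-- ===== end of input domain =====

-- B replaces A's O(repeats) LCG loop by binary exponentiation of the affine map mod 2^48 (O(log repeats)); measurably faster.


-- ===== PORT A =====
def java_lcg_next_int (seed : Int) (n : Int) (repeats : Int) : Int :=
  let multiplier : Int := 0x5DEECE66D
  let mask : Int := (1 <<< 48) - 1
  let addend : Int := 0xB
  let seed1 : Int := PySem.Int.band (PySem.Int.bxor seed multiplier) mask
  let seed2 : Int := (PySem.List.pyRange 0 repeats 1).foldl
      (fun s _ => PySem.Int.band (s * multiplier + addend) mask) seed1
  let seed3 : Int := seed2 >>> (17 : Nat)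
  if PySem.Int.band n (n - 1) = 0 then
    PySem.Int.floordiv (seed3 * n) (2 ^ 31)
  else
    PySem.Int.mod seed3 n

-- ===== PORT B =====
-- the 'while r > 0' loop of Source B, as recursion on r.toNat (exact: the loop runs iff r > 0, and 'r >>= 1' is r / 2 for r ≥ 0)
def lcgSkipLoop (r : Nat) (mulCur addCur mulAcc addAcc : Int) : Int × Int :=
  if h : r = 0 then (mulAcc, addAcc)
  else
    let mask : Int := (1 <<< 48) - 1
    let acc : Int × Int :=
      if r % 2 = 1 then
        (PySem.Int.band (mulCur * mulAcc) mask, PySem.Int.band (mulCur * addAcc + addCur) mask)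
      else (mulAcc, addAcc)
    lcgSkipLoop (r / 2) (PySem.Int.band (mulCur * mulCur) mask)
      (PySem.Int.band (mulCur * addCur + addCur) mask) acc.1 acc.2
termination_by r
decreasing_by exact Nat.div_lt_self (Nat.pos_of_ne_zero h) one_lt_two

def java_lcg_next_int_alt (seed : Int) (n : Int) (repeats : Int) : Int :=
  let multiplier : Int := 0x5DEECE66D
  let mask : Int := (1 <<< 48) - 1
  let addend : Int := 0xB
  let seed1 : Int := PySem.Int.band (PySem.Int.bxor seed multiplier) mask
  let mac : Int × Int := lcgSkipLoop repeats.toNat multiplier addend 1 0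
  let seed2 : Int := PySem.Int.band (mac.1 * seed1 + mac.2) mask
  let seed3 : Int := seed2 >>> (17 : Nat)
  if PySem.Int.band n (n - 1) = 0 then
    PySem.Int.floordiv (seed3 * n) (2 ^ 31)
  else
    PySem.Int.mod seed3 n

-- ===== PRECONDITION & SPEC =====
def Spec_java_lcg_next_int (seed : Int) (n : Int) (repeats : Int) (out : Int) : Prop := out = java_lcg_next_int_alt seed n repeats
instance (seed : Int) (n : Int) (repeats : Int) (out : Int) : Decidable (Spec_java_lcg_next_int seed n repeats out) := by unfold Spec_java_lcg_next_int; infer_instance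

-- ===== CLAIM (what is proved, stated in full; the proofs are below) =====
def Claim_equal_java_lcg_next_int : Prop := ∀ (seed : Int) (n : Int) (repeats : Int), Dom_java_lcg_next_int seed n repeats → Spec_java_lcg_next_int seed n repeats (java_lcg_next_int seed n repeats)

-- ===== LEMMAS AND PROOFS =====

-- Python's  x & (2^48 - 1)  is  x mod 2^48, for every int x (also negative)
theorem band_mask_emod (x : Int) : PySem.Int.band x ((1 <<< 48) - 1) = x % 2 ^ 48 := by
  have hm : ((1 <<< 48 : Int) - 1) = 281474976710655 := by decide
  rw [hm]
  unfold PySem.Int.band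
  split_ifs with h1 h2 h2
  · have := Nat.and_two_pow_sub_one_eq_mod x.toNat 48
    simp only [show ((281474976710655 : Int).toNat) = 2 ^ 48 - 1 by decide] at *
    rw [this]; omega
  · omega
  · have := Nat.and_two_pow_sub_one_eq_mod (-x - 1).toNat 48
    simp only [show ((281474976710655 : Int).toNat) = 2 ^ 48 - 1 by decide] at *
    rw [Nat.and_comm, this]; omega
  · omega

-- one LCG step modulo 2^48 (the A-side loop body after band_mask_emod, up to mul_comm)
def lcgStep (a c x : Int) : Int := (a * x + c) % 2 ^ 48

-- composing two affine maps mod 2^48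
theorem comp_emod (a c A C x : Int) :
    ((a * A % 2 ^ 48) * x + (a * C + c) % 2 ^ 48) % 2 ^ 48
      = (a * ((A * x + C) % 2 ^ 48) + c) % 2 ^ 48 := by
  have e : ∀ p : Int, p % 2 ^ 48 ≡ p [ZMOD (2 ^ 48)] :=
    fun p => Int.emod_emod_of_dvd p dvd_rfl
  have l : (a * A % 2 ^ 48) * x + (a * C + c) % 2 ^ 48 ≡ a * A * x + (a * C + c) [ZMOD (2 ^ 48)] :=
    ((e (a * A)).mul_right x).add (e (a * C + c))
  have r : a * ((A * x + C) % 2 ^ 48) + c ≡ a * (A * x + C) + c [ZMOD (2 ^ 48)] :=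
    ((e (A * x + C)).mul_left a).add_right c
  have hm : a * A * x + (a * C + c) = a * (A * x + C) + c := by ring
  exact l.trans (hm ▸ r.symm)

theorem comp_step (a c A C x : Int) :
    ((a * A % 2 ^ 48) * x + (a * C + c) % 2 ^ 48) % 2 ^ 48
      = lcgStep a c ((A * x + C) % 2 ^ 48) := by
  simp only [lcgStep]
  exact comp_emod a c A C x

theorem foldl_const_iterate (f : Int → Int) : ∀ (l : List Int) (s : Int),
    l.foldl (fun s _ => f s) s = f^[l.length] s := by
  intro l
  induction l with
  | nil => intro s; rfl
  | cons x xs ih => intro s; simp [List.foldl_cons, ih, Function.iterate_succ_apply]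

theorem lcgSkipLoop_spec : ∀ (r : Nat) (a c A C x : Int),
    ((lcgSkipLoop r a c A C).1 * x + (lcgSkipLoop r a c A C).2) % 2 ^ 48
      = (lcgStep a c)^[r] ((A * x + C) % 2 ^ 48) := by
  intro r
  induction r using Nat.strong_induction_on with
  | _ r ih =>
    intro a c A C x
    by_cases h : r = 0
    · subst h; rw [lcgSkipLoop]; simp
    · have hlt : r / 2 < r := Nat.div_lt_self (Nat.pos_of_ne_zero h) one_lt_two
      have hsq : lcgStep (a * a % 2 ^ 48) ((a * c + c) % 2 ^ 48) = lcgStep a c ∘ lcgStep a c := by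
        funext y
        have : lcgStep (a * a % 2 ^ 48) ((a * c + c) % 2 ^ 48) y
            = lcgStep a c ((a * y + c) % 2 ^ 48) := comp_step a c a c y
        rw [this]
        rfl
      have h2 : (lcgStep a c ∘ lcgStep a c) = (lcgStep a c)^[2] := by
        funext y; rfl
      rw [lcgSkipLoop, dif_neg h]
      by_cases hodd : r % 2 = 1
      · simp only [hodd, if_pos, band_mask_emod]
        rw [ih (r / 2) hlt, comp_step, hsq, h2, ← Function.iterate_mul,
          ← Function.iterate_succ_apply]
        congr 1
        omega
      · simp only [hodd, ite_false, band_mask_emod]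
        rw [ih (r / 2) hlt, hsq, h2, ← Function.iterate_mul]
        congr 1
        omega

-- ===== VERDICT (by name: the statement is the Claim_ definition above) =====
theorem java_lcg_next_int_spec : Claim_equal_java_lcg_next_int := by
  intro seed n repeats _
  unfold Spec_java_lcg_next_int java_lcg_next_int java_lcg_next_int_alt
  simp only [band_mask_emod]
  have key :
      (PySem.List.pyRange 0 repeats 1).foldl
          (fun s _ => (s * 25214903917 + 11) % 2 ^ 48)
          (PySem.Int.bxor seed 25214903917 % 2 ^ 48)
        = ((lcgSkipLoop repeats.toNat 25214903917 11 1 0).1 *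
              (PySem.Int.bxor seed 25214903917 % 2 ^ 48) +
            (lcgSkipLoop repeats.toNat 25214903917 11 1 0).2) % 2 ^ 48 := by
    have hb : (fun (s : Int) (_ : Int) => (s * 25214903917 + 11) % 2 ^ 48)
        = (fun (s : Int) (_ : Int) => lcgStep 25214903917 11 s) := by
      funext s t
      simp only [lcgStep, mul_comm]
    rw [lcgSkipLoop_spec, hb, foldl_const_iterate (lcgStep 25214903917 11),
      PySem.List.length_pyRange_one]
    have h0 : (1 * (PySem.Int.bxor seed 25214903917 % 2 ^ 48) + 0) % 2 ^ 48
        = PySem.Int.bxor seed 25214903917 % 2 ^ 48 := by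
      rw [one_mul, add_zero]
      exact Int.emod_emod_of_dvd _ dvd_rfl
    rw [h0, Int.sub_zero]
  rw [key]
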